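-- pv_equiv track=rewrite | github.com/nivecher/meal-expense-tracker | wsgi.py | _process_wsgi_headers
-- ===== SOURCE A (Python) =====
-- from typing import Any, Callable, Dict, List, Optional, Tuple
--
-- def _process_wsgi_headers(response_headers: List[Tuple[str, str]]) -> Dict[str, str]:
--     """Process WSGI response headers into a normalized dictionary.
--
--     Args:
--         response_headers: List of (header_name, value) tuples from WSGI
--
--     Returns:
--         Dict of normalized headers with lowercase keys
--     """
--     headers: Dict[str, str] = {}
--     for name, value in response_headers:
--         name = name.lower()
--         if name in headers:
--             # Handle duplicate headers by joining with comma
--             headers[name] = ", ".join([headers[name], value])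
--         else:
--             headers[name] = value
--     return headers
-- ===== SOURCE B (Python) =====
-- from typing import Dict, List, Tuple
--
-- def _process_wsgi_headers(response_headers: List[Tuple[str, str]]) -> Dict[str, str]:
--     """Distinct lowercased keys in first-seen order, then one full rescan per key."""
--     keys = list(dict.fromkeys(n.lower() for n, _ in response_headers))
--     return {
--         k: ", ".join(v for n, v in response_headers if n.lower() == k)
--         for k in keys
--     }
-- ===== Notes on version B (the rewrite author's own statement) =====
-- stated objective: alternative
-- what changed: B abandons A's single fold over a mutable dict of running joined strings: it first computes the distinct lowercased header names in first-seen order (dict.fromkeys) and then, for each key, rescans the whole input list to collect and join that key's values in one comprehension - a nested-scan algorithm with no incremental dict updates.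
import Mathlib
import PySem

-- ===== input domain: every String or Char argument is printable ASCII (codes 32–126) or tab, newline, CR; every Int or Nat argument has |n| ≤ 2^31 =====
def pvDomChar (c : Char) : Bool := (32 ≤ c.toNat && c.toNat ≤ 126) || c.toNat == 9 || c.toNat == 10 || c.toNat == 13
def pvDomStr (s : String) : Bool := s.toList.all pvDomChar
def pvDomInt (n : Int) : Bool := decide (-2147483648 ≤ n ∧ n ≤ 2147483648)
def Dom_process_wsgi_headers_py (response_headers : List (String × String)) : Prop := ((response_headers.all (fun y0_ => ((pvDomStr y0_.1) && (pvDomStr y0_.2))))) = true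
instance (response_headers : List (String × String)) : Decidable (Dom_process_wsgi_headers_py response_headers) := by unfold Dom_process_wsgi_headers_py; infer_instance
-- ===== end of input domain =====

-- B replaces A's single fold over a mutable dict of running joined strings by a nested-scan
-- algorithm: distinct lowercased names in first-seen order, then one full rescan per key
-- joining that key's values at once (objective: alternative; same return value).

-- ===== PORT A =====
-- literal transliteration of A: one fold over the headers; on a duplicate (lowercased) name,
-- re-join the stored string with the new value, else store the value.
def process_wsgi_headers_py (response_headers : List (String × String)) : List (String × String) :=
  (response_headers.foldl
    (fun (headers : PySem.Dict String String) nv =>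
      let name := PySem.Str.lower nv.1
      match headers.get? name with
      | some cur => headers.insert name (PySem.Str.join ", " [cur, nv.2])
      | none => headers.insert name nv.2)
    PySem.Dict.empty).items

-- ===== PORT B =====
-- literal transliteration of B: keys = list(dict.fromkeys(lowercased names)), then for each key
-- a rescan of the whole input collecting and joining its values.
def process_wsgi_headers_py_alt (response_headers : List (String × String)) : List (String × String) :=
  let keys := PySem.List.dedup (response_headers.map (fun nv => PySem.Str.lower nv.1))
  keys.map (fun k =>
    (k, PySem.Str.join ", "
      ((response_headers.filter (fun nv => PySem.Str.lower nv.1 == k)).map (fun nv => nv.2))))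

-- ===== PRECONDITION & SPEC =====
def Spec_process_wsgi_headers_py (response_headers : List (String × String)) (out : List (String × String)) : Prop := out = process_wsgi_headers_py_alt response_headers
instance (response_headers : List (String × String)) (out : List (String × String)) : Decidable (Spec_process_wsgi_headers_py response_headers out) := by unfold Spec_process_wsgi_headers_py; infer_instance

-- ===== CLAIM (what is proved, stated in full; the proofs are below) =====
def Claim_equal_process_wsgi_headers_py : Prop := ∀ (response_headers : List (String × String)), Dom_process_wsgi_headers_py response_headers → Spec_process_wsgi_headers_py response_headers (process_wsgi_headers_py response_headers)

-- ===== LEMMAS AND PROOFS =====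

-- the lowercased key of a header pair
def pvKey (nv : String × String) : String := PySem.Str.lower nv.1

-- A's loop step
def pvStepA (headers : PySem.Dict String String) (nv : String × String) : PySem.Dict String String :=
  let name := PySem.Str.lower nv.1
  match headers.get? name with
  | some cur => headers.insert name (PySem.Str.join ", " [cur, nv.2])
  | none => headers.insert name nv.2

-- A's new value at the touched key, as a function of the old optional value
def pvJoinStep (o : Option String) (v : String) : String :=
  match o with
  | some s => PySem.Str.join ", " [s, v]
  | none => v

lemma pvStepA_eq_insert (d : PySem.Dict String String) (nv : String × String) :
    pvStepA d nv = d.insert (pvKey nv) (pvJoinStep (d.get? (pvKey nv)) nv.2) := by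
  unfold pvStepA pvJoinStep pvKey
  cases h : d.get? (PySem.Str.lower nv.1) <;> simp [h]

lemma pvFoldA_eq (l : List (String × String)) (d : PySem.Dict String String) :
    l.foldl pvStepA d
      = l.foldl (fun d x => d.insert (pvKey x) (pvJoinStep (d.get? (pvKey x)) x.2)) d := by
  induction l generalizing d with
  | nil => rfl
  | cons p t ih => simp only [List.foldl_cons, pvStepA_eq_insert, ih]

-- joining Python-style: "sep.join" absorbs an already-joined head pair
lemma pvJoin_cons_cons (s v : String) (tl : List String) :
    PySem.Str.join ", " (PySem.Str.join ", " [s, v] :: tl)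
      = PySem.Str.join ", " (s :: v :: tl) := by
  apply String.toList_inj.mp
  cases tl with
  | nil =>
      simp only [PySem.Str.toList_join, List.map_cons, List.map_nil]
      rw [PySem.Chars.join_singleton]
  | cons t ts =>
      simp only [PySem.Str.toList_join, List.map_cons, List.map_nil]
      rw [PySem.Chars.join_cons_cons ", ".toList
          (PySem.Chars.join ", ".toList [s.toList, v.toList]) t.toList,
        PySem.Chars.join_cons_cons ", ".toList s.toList v.toList ([] : List (List Char)),
        PySem.Chars.join_singleton,
        PySem.Chars.join_cons_cons ", ".toList s.toList v.toList
          (t.toList :: List.map String.toList ts),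
        PySem.Chars.join_cons_cons ", ".toList v.toList t.toList]
      simp [List.append_assoc]

lemma pvJoin_singleton (s : String) : PySem.Str.join ", " [s] = s := by
  apply String.toList_inj.mp
  simp only [PySem.Str.toList_join, List.map_cons, List.map_nil]
  exact PySem.Chars.join_singleton _ _

lemma pvFold_joinStep_some (vs : List String) (s : String) :
    vs.foldl (fun o v => some (pvJoinStep o v)) (some s)
      = some (PySem.Str.join ", " (s :: vs)) := by
  induction vs generalizing s with
  | nil => simp only [List.foldl_nil, pvJoin_singleton]
  | cons v tl ih =>
      rw [List.foldl_cons]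
      have h1 : pvJoinStep (some s) v = PySem.Str.join ", " [s, v] := rfl
      rw [h1, ih, pvJoin_cons_cons]

-- characterization of A's lookup after the whole fold
lemma pvFoldA_get? (l : List (String × String)) (d : PySem.Dict String String) (k : String) :
    (l.foldl pvStepA d).get? k
      = ((l.filter (fun p => pvKey p == k)).map (fun p => p.2)).foldl
          (fun o v => some (pvJoinStep o v)) (d.get? k) := by
  induction l generalizing d with
  | nil => rfl
  | cons p t ih =>
      rw [List.foldl_cons, ih]
      by_cases hk : pvKey p = k
      · subst hk
        have hstep : (pvStepA d p).get? (pvKey p)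
            = some (pvJoinStep (d.get? (pvKey p)) p.2) := by
          rw [pvStepA_eq_insert, PySem.Dict.get?_insert_self]
        simp [hstep]
      · have hstep : (pvStepA d p).get? k = d.get? k := by
          rw [pvStepA_eq_insert]
          exact PySem.Dict.get?_insert_of_ne d _ (fun h => hk h.symm)
        simp [hk, hstep]

theorem pv_main (l : List (String × String)) :
    process_wsgi_headers_py l = process_wsgi_headers_py_alt l := by
  have hA : process_wsgi_headers_py l = (l.foldl pvStepA PySem.Dict.empty).items := rfl
  rw [hA]
  set dA := l.foldl pvStepA PySem.Dict.empty with hdA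
  have hkeysA : dA.keys = PySem.Set.ofList (l.map pvKey) := by
    rw [hdA, pvFoldA_eq]
    exact (PySem.Dict.keys_foldl_insert_key l pvKey
        (fun d x => pvJoinStep (d.get? (pvKey x)) x.2) PySem.Dict.empty).trans
      (by simp [PySem.Dict.keys_empty, PySem.Set.update_nil_left])
  have hndA : dA.keys.Nodup := by
    rw [hdA, pvFoldA_eq]
    exact PySem.Dict.nodup_keys_foldl_insert_key l pvKey
      (fun d x => pvJoinStep (d.get? (pvKey x)) x.2) PySem.Dict.empty
      (by simp [PySem.Dict.keys_empty])
  rw [PySem.Dict.items_eq_map_keys dA hndA ""]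
  unfold process_wsgi_headers_py_alt
  have hkeys : PySem.List.dedup (l.map (fun nv => PySem.Str.lower nv.1)) = dA.keys := by
    rw [hkeysA]; rw [PySem.List.dedup_eq_ofList]; rfl
  rw [hkeys]
  apply List.map_congr_left
  intro k hk
  have hkmem : ∃ p ∈ l, pvKey p = k := by
    rw [hkeysA, PySem.Set.mem_ofList] at hk
    simpa using hk
  have hfilter : (l.filter (fun p => pvKey p == k)).map (fun p => p.2) ≠ [] := by
    obtain ⟨p, hp, hpk⟩ := hkmem
    simp only [ne_eq, List.map_eq_nil_iff, List.filter_eq_nil_iff]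
    intro h
    exact h p hp (by simp [hpk])
  obtain ⟨v, vs, hvs⟩ := List.exists_cons_of_ne_nil hfilter
  have hAv : dA.get? k = some (PySem.Str.join ", " (v :: vs)) := by
    rw [hdA, pvFoldA_get? l PySem.Dict.empty k, PySem.Dict.get?_empty, hvs]
    rw [List.foldl_cons]
    have h1 : pvJoinStep none v = v := rfl
    rw [h1, pvFold_joinStep_some]
  rw [PySem.Dict.getD_eq_get?_getD, hAv]
  simp only [Option.getD_some]
  have : (l.filter (fun nv => PySem.Str.lower nv.1 == k)).map (fun nv => nv.2) = v :: vs := by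
    rw [← hvs]; rfl
  rw [this]

-- ===== VERDICT (by name: the statement is the Claim_ definition above) =====
theorem process_wsgi_headers_py_spec : Claim_equal_process_wsgi_headers_py := by
  intro l _
  unfold Spec_process_wsgi_headers_py
  exact pv_main l
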